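-- pv_equiv track=rewrite | github.com/y0geshpatil/Google-CodeJam-2020-Solutions | Qualification Round/5. Indicium.py | constructMatrix
-- ===== SOURCE A (Python) =====
-- def fillRemaining(i, j, n,mat):
--     x = 2
--
--     for k in range(i + 1,n):
--         mat[k][j] = x
--         x+=1
--     for k in range(i):
--         mat[k][j] = x
--         x+=1
--
-- def constructMatrix(n,mat):
--
--
--     for _ in range(n):
--         t=[]
--         for _ in range(n):
--             t.append(0)
--         mat.append(t)
--     right = n - 1
--     left = 0;
--     for i in range(n):
--         if (i % 2 == 0):
--             mat[i][right] = 1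
--             fillRemaining(i, right, n,mat)
--             right-=1
--         else:
--             mat[i][left] = 1
--             fillRemaining(i, left, n,mat)
--             left+=1
--     return mat
-- ===== SOURCE B (Python) =====
-- def constructMatrix(n, mat):
--     # row-major fill via closed-form pivot; mutates mat like the original and returns it
--     for _ in range(n):
--         mat.append([0] * n)
--     h = n // 2
--     for r in range(n):
--         row = mat[r]
--         for c in range(n):
--             i = 2 * c + 1 if c < h else 2 * (n - 1 - c)
--             row[c] = 1 if r == i else 2 + (r - i - 1) % n
--     return mat
-- ===== Notes on version B (the rewrite author's own statement) =====
-- stated objective: simpler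
-- what changed: Replaced A's two-pointer, column-by-column filling (with a fillRemaining helper carrying a running counter) by a single row-major pass that computes each cell directly from a closed-form pivot: column c is owned by pivot row 2*c+1 if c < n//2 else 2*(n-1-c), and cell (r,c) is 1 on the pivot row, else 2 + (r-pivot-1) % n.
import Mathlib
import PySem

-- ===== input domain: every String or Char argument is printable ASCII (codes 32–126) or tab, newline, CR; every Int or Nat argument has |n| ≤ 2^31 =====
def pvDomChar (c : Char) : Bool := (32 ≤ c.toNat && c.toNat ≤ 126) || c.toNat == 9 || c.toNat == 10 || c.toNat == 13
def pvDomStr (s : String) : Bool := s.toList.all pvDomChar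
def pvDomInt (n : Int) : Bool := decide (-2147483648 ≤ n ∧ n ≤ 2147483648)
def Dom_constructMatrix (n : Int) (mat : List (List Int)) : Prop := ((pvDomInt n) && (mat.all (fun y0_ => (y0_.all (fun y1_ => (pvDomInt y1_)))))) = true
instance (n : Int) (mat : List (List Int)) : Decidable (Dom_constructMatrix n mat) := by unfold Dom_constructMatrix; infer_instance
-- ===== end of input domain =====

-- B replaces A's two-pointer column-by-column filling with a single row-major pass using a
-- closed-form pivot per column (objective: simpler/alternative decomposition, same cost).
-- Both programs mutate `mat` in place and return it; the equivalence proved is about the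
-- returned value (B performs the same final mutation).

-- ===== PORT A =====
-- mat[k][j] = v ; all of A's writes use nonnegative indices, so `.toNat` is exact here; an
-- out-of-range write is where Python raises IndexError — those inputs are excluded by Pre_.
def pySetCell (mat : List (List Int)) (k j v : Int) : List (List Int) :=
  mat.modify k.toNat (fun row => row.set j.toNat v)

def fillRemaining (i j n : Int) (mat : List (List Int)) : List (List Int) :=
  let st1 := (PySem.List.pyRange (i+1) n).foldl
      (fun (p : List (List Int) × Int) k => (pySetCell p.1 k j p.2, p.2 + 1)) (mat, 2)
  ((PySem.List.pyRange 0 i).foldl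
      (fun (p : List (List Int) × Int) k => (pySetCell p.1 k j p.2, p.2 + 1)) st1).1

-- loop body of A's `for i in range(n)` (state: matrix, right, left)
def constructMatrix_step (n : Int) (s : List (List Int) × Int × Int) (i : Int) :
    List (List Int) × Int × Int :=
  if PySem.Int.mod i 2 = 0 then
    (fillRemaining i s.2.1 n (pySetCell s.1 i s.2.1 1), s.2.1 - 1, s.2.2)
  else
    (fillRemaining i s.2.2 n (pySetCell s.1 i s.2.2 1), s.2.1, s.2.2 + 1)

def constructMatrix (n : Int) (mat : List (List Int)) : List (List Int) :=
  let mat := (PySem.List.pyRange 0 n).foldl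
      (fun m _ => m ++ [(PySem.List.pyRange 0 n).foldl (fun t _ => t ++ [(0:Int)]) []]) mat
  ((PySem.List.pyRange 0 n).foldl (constructMatrix_step n) (mat, n - 1, 0)).1

-- ===== PORT B =====
def constructMatrix_alt (n : Int) (mat : List (List Int)) : List (List Int) :=
  let mat := (PySem.List.pyRange 0 n).foldl
      (fun m _ => m ++ [List.replicate n.toNat (0:Int)]) mat
  let h := PySem.Int.floordiv n 2
  (PySem.List.pyRange 0 n).foldl
    (fun m r => m.modify r.toNat (fun row =>
      (PySem.List.pyRange 0 n).foldl
        (fun row c =>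
          let i := if c < h then 2*c+1 else 2*(n-1-c)
          row.set c.toNat (if r = i then 1 else 2 + PySem.Int.mod (r - i - 1) n)) row)) mat

-- ===== PRECONDITION & SPEC =====
-- Pre_ excludes exactly the inputs where Python A raises IndexError: some of the first
-- min(len(mat), n) pre-existing rows is shorter than n, so a write mat[k][j] goes out of range.
def Pre_constructMatrix (n : Int) (mat : List (List Int)) : Prop :=
  ∀ row ∈ mat.take n.toNat, n ≤ (row.length : Int)
instance (n : Int) (mat : List (List Int)) : Decidable (Pre_constructMatrix n mat) := by
  unfold Pre_constructMatrix; infer_instance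
def pvWitness_constructMatrix : Int × List (List Int) := (2, [[5, 5, 5]])

def Spec_constructMatrix (n : Int) (mat : List (List Int)) (out : List (List Int)) : Prop := out = constructMatrix_alt n mat
instance (n : Int) (mat : List (List Int)) (out : List (List Int)) : Decidable (Spec_constructMatrix n mat out) := by unfold Spec_constructMatrix; infer_instance

-- ===== CLAIM (what is proved, stated in full; the proofs are below) =====
def Claim_equal_constructMatrix : Prop := ∀ (n : Int) (mat : List (List Int)), Dom_constructMatrix n mat → Pre_constructMatrix n mat → Spec_constructMatrix n mat (constructMatrix n mat)

-- ===== LEMMAS AND PROOFS =====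

-- pivot row of column c, and the final value of cell (r, c) (B's closed form)
def pvPivot (n c : Int) : Int :=
  if c < PySem.Int.floordiv n 2 then 2*c+1 else 2*(n-1-c)
def pvF (n r c : Int) : Int :=
  if r = pvPivot n c then 1 else 2 + PySem.Int.mod (r - pvPivot n c - 1) n

-- the matrix after A's first m loop iterations: all columns whose pivot is < m are painted
def pvPaint (n m : Int) (mat : List (List Int)) : List (List Int) :=
  mat.mapIdx (fun r row => if (r:Int) < n then
    row.mapIdx (fun c v => if (c:Int) < n ∧ pvPivot n (c:Int) < m then pvF n (r:Int) (c:Int) else v)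
    else row)

-- the value written into column c (pivot i) at row r by one iteration of A's loop
def pvColVal (n i r : Int) : Int :=
  if r = i then 1 else if i < r then 2 + (r - i - 1) else 2 + (n - i - 1) + r

-- a loop of modifies at distinct rows is a conditional mapIdx
theorem pv_foldl_modify (lo : Int) (hlo : 0 ≤ lo) (f : Int → List Int → List Int) :
    ∀ (d : Nat) (m : List (List Int)),
      (PySem.List.pyRange lo (lo + d)).foldl (fun m k => m.modify k.toNat (f k)) m
        = m.mapIdx (fun r row => if lo ≤ (r:Int) ∧ (r:Int) < lo + d then f ((r:Int)) row else row) := by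
  intro d
  induction d with
  | zero =>
    intro m
    rw [show lo + (0:Nat) = lo by push_cast; ring, PySem.List.pyRange_one_eq_nil le_rfl]
    apply List.ext_getElem
    · simp
    · intro i h1 h2
      simp only [List.getElem_mapIdx, List.foldl_nil]
      rw [if_neg (by omega)]
  | succ d ih =>
    intro m
    rw [show lo + ((d:Nat)+1:Nat) = (lo + d) + 1 by push_cast; ring,
        PySem.List.pyRange_one_succ_right (by omega), List.foldl_append]
    simp only [List.foldl_cons, List.foldl_nil]
    rw [ih m]
    apply List.ext_getElem
    · simp
    · intro i h1 h2
      rw [List.getElem_modify]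
      simp only [List.getElem_mapIdx]
      by_cases hc : (lo + (d:Int)).toNat = i
      · have hi : (i:Int) = lo + d := by omega
        rw [if_pos hc, if_neg (by omega), if_pos (by omega), hi]
      · rw [if_neg hc]
        by_cases hin : lo ≤ (i:Int) ∧ (i:Int) < lo + d
        · rw [if_pos hin, if_pos ⟨hin.1, by omega⟩]
        · rw [if_neg hin, if_neg (by omega)]

theorem pv_foldl_modify' (lo hi : Int) (hlo : 0 ≤ lo) (hhi : lo ≤ hi) (f : Int → List Int → List Int)
    (m : List (List Int)) :
    (PySem.List.pyRange lo hi).foldl (fun m k => m.modify k.toNat (f k)) m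
      = m.mapIdx (fun r row => if lo ≤ (r:Int) ∧ (r:Int) < hi then f ((r:Int)) row else row) := by
  obtain ⟨d, rfl⟩ : ∃ d : Nat, hi = lo + (d:Int) := ⟨(hi-lo).toNat, by omega⟩
  exact pv_foldl_modify lo hlo f d m

-- a loop of sets at distinct positions is a conditional mapIdx
theorem pv_foldl_set (lo : Int) (hlo : 0 ≤ lo) (g : Int → Int) :
    ∀ (d : Nat) (row : List Int),
      (PySem.List.pyRange lo (lo + d)).foldl (fun row c => row.set c.toNat (g c)) row
        = row.mapIdx (fun c v => if lo ≤ (c:Int) ∧ (c:Int) < lo + d then g ((c:Int)) else v) := by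
  intro d
  induction d with
  | zero =>
    intro row
    rw [show lo + (0:Nat) = lo by push_cast; ring, PySem.List.pyRange_one_eq_nil le_rfl]
    apply List.ext_getElem
    · simp
    · intro i h1 h2
      simp only [List.getElem_mapIdx, List.foldl_nil]
      rw [if_neg (by omega)]
  | succ d ih =>
    intro row
    rw [show lo + ((d:Nat)+1:Nat) = (lo + d) + 1 by push_cast; ring,
        PySem.List.pyRange_one_succ_right (by omega), List.foldl_append]
    simp only [List.foldl_cons, List.foldl_nil]
    rw [ih row]
    apply List.ext_getElem
    · simp
    · intro i h1 h2
      rw [List.getElem_set]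
      simp only [List.getElem_mapIdx]
      by_cases hc : (lo + (d:Int)).toNat = i
      · have hi : (i:Int) = lo + d := by omega
        rw [if_pos hc, if_pos (by omega), hi]
      · rw [if_neg hc]
        by_cases hin : lo ≤ (i:Int) ∧ (i:Int) < lo + d
        · rw [if_pos hin, if_pos ⟨hin.1, by omega⟩]
        · rw [if_neg hin, if_neg (by omega)]

theorem pv_foldl_set' (lo hi : Int) (hlo : 0 ≤ lo) (hhi : lo ≤ hi) (g : Int → Int) (row : List Int) :
    (PySem.List.pyRange lo hi).foldl (fun row c => row.set c.toNat (g c)) row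
      = row.mapIdx (fun c v => if lo ≤ (c:Int) ∧ (c:Int) < hi then g ((c:Int)) else v) := by
  obtain ⟨d, rfl⟩ : ∃ d : Nat, hi = lo + (d:Int) := ⟨(hi-lo).toNat, by omega⟩
  exact pv_foldl_set lo hlo g d row

-- decouple the running counter x from the write loops of fillRemaining
theorem pv_foldl_counter (lo : Int) (j : Int) :
    ∀ (d : Nat) (m : List (List Int)) (x0 : Int),
      (PySem.List.pyRange lo (lo + d)).foldl
          (fun (p : List (List Int) × Int) k => (pySetCell p.1 k j p.2, p.2 + 1)) (m, x0)
        = ((PySem.List.pyRange lo (lo + d)).foldl (fun m k => pySetCell m k j (x0 + (k - lo))) m,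
           x0 + d) := by
  intro d
  induction d with
  | zero =>
    intro m x0
    rw [show lo + (0:Nat) = lo by push_cast; ring, PySem.List.pyRange_one_eq_nil le_rfl]
    simp
  | succ d ih =>
    intro m x0
    rw [show lo + ((d:Nat)+1:Nat) = (lo + d) + 1 by push_cast; ring,
        PySem.List.pyRange_one_succ_right (by omega), List.foldl_append, List.foldl_append]
    simp only [List.foldl_cons, List.foldl_nil]
    rw [ih m x0]
    rw [Prod.mk.injEq]
    constructor
    · rw [show lo + (d:Int) - lo = (d:Int) by ring]
    · push_cast; ring

theorem pv_foldl_counter' (lo hi : Int) (hhi : lo ≤ hi) (j : Int) (m : List (List Int)) (x0 : Int) :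
    (PySem.List.pyRange lo hi).foldl
        (fun (p : List (List Int) × Int) k => (pySetCell p.1 k j p.2, p.2 + 1)) (m, x0)
      = ((PySem.List.pyRange lo hi).foldl (fun m k => pySetCell m k j (x0 + (k - lo))) m,
         x0 + (hi - lo)) := by
  obtain ⟨d, rfl⟩ : ∃ d : Nat, hi = lo + (d:Int) := ⟨(hi-lo).toNat, by omega⟩
  rw [pv_foldl_counter lo j d m x0]
  rw [Prod.mk.injEq]
  exact ⟨rfl, by ring⟩

theorem pv_fillRemaining_eq (n i c : Int) (h0 : 0 ≤ i) (hin : i < n) (m : List (List Int)) :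
    fillRemaining i c n m = m.mapIdx (fun r row =>
      if (r:Int) < n ∧ (r:Int) ≠ i then row.set c.toNat (pvColVal n i (r:Int)) else row) := by
  simp only [fillRemaining]
  rw [pv_foldl_counter' (i+1) n (by omega) c m 2]
  rw [pv_foldl_counter' 0 i (by omega) c _ (2 + (n - (i+1)))]
  simp only [pySetCell]
  rw [pv_foldl_modify' (i+1) n (by omega) (by omega) (fun k row => row.set c.toNat (2 + (k - (i+1)))) m,
      pv_foldl_modify' 0 i (by omega) (by omega) (fun k row => row.set c.toNat (2 + (n - (i+1)) + (k - 0))) _]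
  apply List.ext_getElem
  · simp
  · intro r h1 h2
    simp only [List.getElem_mapIdx]
    by_cases hlt : (r:Int) < i
    · rw [if_pos (by omega), if_neg (by omega), if_pos (by omega)]
      unfold pvColVal
      rw [if_neg (by omega), if_neg (by omega)]
      congr 1
      omega
    · by_cases heq : (r:Int) = i
      · rw [if_neg (by omega), if_neg (by omega), if_neg (by omega)]
      · by_cases hn : (r:Int) < n
        · rw [if_neg (by omega), if_pos (by omega), if_pos (by omega)]
          unfold pvColVal
          rw [if_neg (by omega), if_pos (by omega)]
          congr 1
          omega
        · rw [if_neg (by omega), if_neg (by omega), if_neg (by omega)]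

-- one whole iteration of A's i-loop paints column c with pvColVal at every row < n
theorem pv_iter_eq (n i c : Int) (h0 : 0 ≤ i) (hin : i < n) (mat : List (List Int)) :
    fillRemaining i c n (pySetCell mat i c 1)
      = mat.mapIdx (fun r row => if (r:Int) < n then row.set c.toNat (pvColVal n i (r:Int)) else row) := by
  rw [pv_fillRemaining_eq n i c h0 hin]
  simp only [pySetCell]
  apply List.ext_getElem
  · simp
  · intro r h1 h2
    simp only [List.getElem_mapIdx, List.getElem_modify]
    by_cases heq : (r:Int) = i
    · rw [if_neg (by omega), if_pos (by omega), if_pos (by omega)]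
      unfold pvColVal
      rw [if_pos heq]
    · by_cases hn : (r:Int) < n
      · rw [if_pos (by omega), if_neg (by omega), if_pos (by omega)]
      · rw [if_neg (by omega), if_neg (by omega), if_neg (by omega)]

theorem pv_pivot_iff (n C d : Int) (hn : 0 < n) (hdn : d < n) :
    pvPivot n C = d ↔ C = (if d % 2 = 0 then n - 1 - d / 2 else (d - 1) / 2) := by
  unfold pvPivot
  rw [PySem.Int.floordiv_eq_ediv_of_pos (by omega)]
  split <;> split <;> omega

theorem pv_pivot_bounds (n C : Int) (hn : 0 < n) (hC0 : 0 ≤ C) (hCn : C < n) :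
    0 ≤ pvPivot n C ∧ pvPivot n C < n := by
  unfold pvPivot
  rw [PySem.Int.floordiv_eq_ediv_of_pos (by omega)]
  split <;> omega

theorem pv_colVal_eq_F (n C d r : Int) (hn : 0 < n) (hp : pvPivot n C = d)
    (hr0 : 0 ≤ r) (hrn : r < n) (hd0 : 0 ≤ d) (hdn : d < n) :
    pvColVal n d r = pvF n r C := by
  unfold pvColVal pvF
  rw [hp, PySem.Int.mod_eq_emod_of_pos (by omega)]
  by_cases h1 : r = d
  · rw [if_pos h1, if_pos h1]
  · rw [if_neg h1, if_neg h1]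
    by_cases h2 : d < r
    · rw [if_pos h2, Int.emod_eq_of_lt (by omega) (by omega)]
    · rw [if_neg h2]
      have e : r - d - 1 = (r - d - 1 + n) + n * (-1) := by ring
      rw [e, Int.add_mul_emod_self_left, Int.emod_eq_of_lt (by omega) (by omega)]
      ring

-- painting column c (the column owned by iteration d) advances pvPaint by one step
theorem pv_paint_step (n d c : Int) (hn : 0 < n) (hd0 : 0 ≤ d) (hdn : d < n)
    (hc : c = (if d % 2 = 0 then n - 1 - d / 2 else (d - 1) / 2)) (mat : List (List Int)) :
    (pvPaint n d mat).mapIdx (fun r row => if (r:Int) < n then row.set c.toNat (pvColVal n d (r:Int)) else row)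
      = pvPaint n (d+1) mat := by
  have hc0 : 0 ≤ c := by rw [hc]; split <;> omega
  have hcn : c < n := by rw [hc]; split <;> omega
  have hpc : pvPivot n c = d := (pv_pivot_iff n c d hn hdn).mpr hc
  unfold pvPaint
  apply List.ext_getElem
  · simp
  · intro r h1 h2
    simp only [List.getElem_mapIdx]
    by_cases hr : (r:Int) < n
    · rw [if_pos hr, if_pos hr, if_pos hr]
      apply List.ext_getElem
      · simp
      · intro cc hc1 hc2
        rw [List.getElem_set]
        simp only [List.getElem_mapIdx]
        by_cases hcc : c.toNat = cc
        · have hcceq : (cc:Int) = c := by omega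
          rw [if_pos hcc, if_pos (by rw [hcceq, hpc]; exact ⟨hcn, by omega⟩), hcceq]
          exact pv_colVal_eq_F n c d (r:Int) hn hpc (by omega) hr hd0 hdn
        · rw [if_neg hcc]
          by_cases hccn : (cc:Int) < n
          · have hne : pvPivot n (cc:Int) ≠ d := by
              intro h
              rw [pv_pivot_iff n (cc:Int) d hn hdn, ← hc] at h
              omega
            by_cases hlt : pvPivot n (cc:Int) < d
            · rw [if_pos ⟨hccn, hlt⟩, if_pos ⟨hccn, by omega⟩]
            · rw [if_neg (by tauto), if_neg (by rw [not_and_or]; right; omega)]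
          · rw [if_neg (by tauto), if_neg (by tauto)]
    · rw [if_neg hr, if_neg hr, if_neg hr]

-- loop invariant for A's main loop
theorem pv_inv (n : Int) (hn : 0 < n) (mat : List (List Int)) :
    ∀ (d : Nat), (d:Int) ≤ n →
      (PySem.List.pyRange 0 d).foldl (constructMatrix_step n) (mat, n - 1, 0)
        = (pvPaint n d mat, n - 1 - ((d:Int) + 1) / 2, (d:Int) / 2) := by
  intro d
  induction d with
  | zero =>
    intro _
    rw [show ((0:Nat):Int) = (0:Int) by norm_num, PySem.List.pyRange_one_eq_nil le_rfl]
    simp only [List.foldl_nil]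
    rw [Prod.mk.injEq, Prod.mk.injEq]
    refine ⟨?_, by norm_num, by norm_num⟩
    unfold pvPaint
    apply List.ext_getElem
    · simp
    · intro r h1 h2
      simp only [List.getElem_mapIdx]
      split
      · apply List.ext_getElem
        · simp
        · intro cc hc1 hc2
          simp only [List.getElem_mapIdx]
          rw [if_neg ?hne]
          case hne =>
            rw [not_and_or]
            by_cases hccn : (cc:Int) < n
            · right
              have := pv_pivot_bounds n (cc:Int) hn (by omega) hccn
              omega
            · left; omega
      · rfl
  | succ d ih =>
    intro hdn
    rw [show ((d+1:Nat):Int) = (d:Int)+1 by push_cast; ring,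
        PySem.List.pyRange_one_succ_right (by omega), List.foldl_append]
    rw [ih (by omega)]
    simp only [List.foldl_cons, List.foldl_nil]
    unfold constructMatrix_step
    rw [PySem.Int.mod_eq_emod_of_pos (by norm_num)]
    by_cases hpar : (d:Int) % 2 = 0
    · rw [if_pos hpar]
      simp only
      rw [pv_iter_eq n (d:Int) (n - 1 - ((d:Int) + 1) / 2) (by omega) (by omega)]
      rw [pv_paint_step n (d:Int) (n - 1 - ((d:Int) + 1) / 2) hn (by omega) (by omega) (by rw [if_pos hpar]; omega) mat]
      rw [Prod.mk.injEq, Prod.mk.injEq]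
      exact ⟨rfl, by omega, by omega⟩
    · rw [if_neg hpar]
      simp only
      rw [pv_iter_eq n (d:Int) ((d:Int) / 2) (by omega) (by omega)]
      rw [pv_paint_step n (d:Int) ((d:Int) / 2) hn (by omega) (by omega) (by rw [if_neg hpar]; omega) mat]
      rw [Prod.mk.injEq, Prod.mk.injEq]
      exact ⟨rfl, by omega, by omega⟩

-- both zero-appending phases build mat ++ n rows of n zeros
theorem pv_zeros_A (n : Int) (mat : List (List Int)) :
    (PySem.List.pyRange 0 n).foldl
        (fun m _ => m ++ [(PySem.List.pyRange 0 n).foldl (fun t _ => t ++ [(0:Int)]) []]) mat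
      = mat ++ List.replicate n.toNat (List.replicate n.toNat 0) := by
  have hin : (PySem.List.pyRange 0 n).foldl (fun t _ => t ++ [(0:Int)]) [] = List.replicate n.toNat 0 := by
    rw [PySem.List.foldl_append_singleton_eq_map (fun (_ : Int) => (0:Int)) (PySem.List.pyRange 0 n) []]
    simp [List.map_const', PySem.List.length_pyRange_one]
  rw [hin,
      PySem.List.foldl_append_singleton_eq_map (fun (_ : Int) => List.replicate n.toNat (0:Int)) (PySem.List.pyRange 0 n) mat]
  simp [List.map_const', PySem.List.length_pyRange_one]

theorem pv_zeros_B (n : Int) (mat : List (List Int)) :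
    (PySem.List.pyRange 0 n).foldl (fun m _ => m ++ [List.replicate n.toNat (0:Int)]) mat
      = mat ++ List.replicate n.toNat (List.replicate n.toNat 0) := by
  rw [PySem.List.foldl_append_singleton_eq_map (fun (_ : Int) => List.replicate n.toNat (0:Int)) (PySem.List.pyRange 0 n) mat]
  simp [List.map_const', PySem.List.length_pyRange_one]

theorem pv_A_eq (n : Int) (hn : 0 < n) (mat : List (List Int)) :
    constructMatrix n mat = pvPaint n n (mat ++ List.replicate n.toNat (List.replicate n.toNat 0)) := by
  simp only [constructMatrix]
  rw [pv_zeros_A]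
  obtain ⟨d, rfl⟩ : ∃ d : Nat, n = (d:Int) := ⟨n.toNat, by omega⟩
  rw [pv_inv (d:Int) hn _ d (le_refl _)]

theorem pv_B_eq (n : Int) (hn : 0 < n) (mat : List (List Int)) :
    constructMatrix_alt n mat = pvPaint n n (mat ++ List.replicate n.toNat (List.replicate n.toNat 0)) := by
  simp only [constructMatrix_alt]
  rw [pv_zeros_B]
  rw [pv_foldl_modify' 0 n (le_refl 0) (by omega)
      (fun r row => (PySem.List.pyRange 0 n).foldl
        (fun row c =>
          row.set c.toNat
            (if r = (if c < PySem.Int.floordiv n 2 then 2*c+1 else 2*(n-1-c)) then 1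
             else 2 + PySem.Int.mod (r - (if c < PySem.Int.floordiv n 2 then 2*c+1 else 2*(n-1-c)) - 1) n)) row)]
  unfold pvPaint
  apply List.ext_getElem
  · simp
  · intro r h1 h2
    simp only [List.getElem_mapIdx]
    by_cases hr : (r:Int) < n
    · rw [if_pos ⟨by omega, hr⟩, if_pos hr]
      rw [pv_foldl_set' 0 n (le_refl 0) (by omega)
          (fun c =>
            (if (r:Int) = (if c < PySem.Int.floordiv n 2 then 2*c+1 else 2*(n-1-c)) then 1
             else 2 + PySem.Int.mod ((r:Int) - (if c < PySem.Int.floordiv n 2 then 2*c+1 else 2*(n-1-c)) - 1) n))]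
      apply List.ext_getElem
      · simp
      · intro cc hc1 hc2
        simp only [List.getElem_mapIdx]
        by_cases hccn : (cc:Int) < n
        · rw [if_pos (show (0:Int) ≤ (cc:Int) ∧ (cc:Int) < n from ⟨by omega, hccn⟩),
              if_pos (show (cc:Int) < n ∧ pvPivot n (cc:Int) < n from
                ⟨hccn, (pv_pivot_bounds n (cc:Int) hn (by omega) hccn).2⟩)]
          unfold pvF pvPivot
          rfl
        · rw [if_neg (by tauto), if_neg (by tauto)]
    · rw [if_neg (by omega), if_neg hr]

-- ===== VERDICT (by name: the statement is the Claim_ definition above) =====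
theorem constructMatrix_spec : Claim_equal_constructMatrix := by
  unfold Claim_equal_constructMatrix
  intro n mat _ _
  unfold Spec_constructMatrix
  by_cases hn : 0 < n
  · rw [pv_A_eq n hn mat, pv_B_eq n hn mat]
  · have hn' : n ≤ 0 := by omega
    simp [constructMatrix, constructMatrix_alt, PySem.List.pyRange_one_eq_nil hn']
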